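-- pv_equiv track=rewrite | github.com/howard5180/discordBot | KaryuBot.py | formatSim
-- ===== SOURCE A (Python) =====
-- def formatSim(msg):
--     result = msg.split(",")
--     fin = ""
--     count = 1
--     for x in result:
--         fin += x
--         if count%3 == 0:
--             fin += "\n"
--         else:
--             fin += "\t"
--         count += 1
--     return fin
-- ===== SOURCE B (Python) =====
-- def formatSim(msg):
--     fields = msg.split(",")
--     out = []
--     while fields:
--         row, fields = fields[:3], fields[3:]
--         out.append("\t".join(row) + ("\n" if len(row) == 3 else "\t"))
--     return "".join(out)
-- ===== Notes on version B (the rewrite author's own statement) =====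
-- stated objective: alternative
-- what changed: B splits the fields into rows of three up front and emits each row joined with tabs plus its terminator, instead of A's per-element loop with a modulo-3 counter.
import Mathlib
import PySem

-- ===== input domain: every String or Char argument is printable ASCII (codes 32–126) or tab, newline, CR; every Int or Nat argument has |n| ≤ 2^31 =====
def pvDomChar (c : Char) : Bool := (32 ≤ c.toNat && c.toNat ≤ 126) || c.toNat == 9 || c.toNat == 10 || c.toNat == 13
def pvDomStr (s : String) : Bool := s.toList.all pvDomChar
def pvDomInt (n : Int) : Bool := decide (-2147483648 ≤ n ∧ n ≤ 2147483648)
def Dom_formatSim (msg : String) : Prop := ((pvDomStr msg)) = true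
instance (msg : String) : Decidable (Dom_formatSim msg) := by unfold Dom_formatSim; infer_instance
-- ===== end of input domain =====

-- B formats the grid row-by-row (chunks of three joined with tabs) instead of A's
-- per-element modulo-3 counter; same cost, different decomposition.

-- ===== PORT A =====
-- the loop body of A: fin += x; newline every third element else tab; count += 1
def pvStepA (st : String × Int) (x : String) : String × Int :=
  let fin := st.1 ++ x
  (if PySem.Int.mod st.2 3 == 0 then fin ++ "\n" else fin ++ "\t", st.2 + 1)

def formatSim (msg : String) : String :=
  let result := (PySem.Str.split? msg ",").getD []   -- sep "," is never empty, split never raises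
  (result.foldl pvStepA ("", 1)).1

-- ===== PORT B =====
-- the while loop of Source B: peel fields[:3] / fields[3:] and emit one row-string per turn
def pvRows : List String → List String
  | [] => []
  | f :: rest =>
      let row := f :: rest.take 2                    -- fields[:3]
      (PySem.Str.join "\t" row ++ (if row.length == 3 then "\n" else "\t")) :: pvRows (rest.drop 2)  -- fields[3:]
termination_by fs => fs.length
decreasing_by simp

def formatSim_alt (msg : String) : String :=
  let fields := (PySem.Str.split? msg ",").getD []
  PySem.Str.join "" (pvRows fields)

-- ===== PRECONDITION & SPEC =====
def Spec_formatSim (msg : String) (out : String) : Prop := out = formatSim_alt msg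
instance (msg : String) (out : String) : Decidable (Spec_formatSim msg out) := by unfold Spec_formatSim; infer_instance

-- ===== CLAIM (what is proved, stated in full; the proofs are below) =====
def Claim_equal_formatSim : Prop := ∀ (msg : String), Dom_formatSim msg → Spec_formatSim msg (formatSim msg)

-- ===== LEMMAS AND PROOFS =====

lemma pvRows_cons (f : String) (rest : List String) : pvRows (f :: rest) =
    (PySem.Str.join "\t" (f :: rest.take 2) ++ (if (f :: rest.take 2).length == 3 then "\n" else "\t"))
      :: pvRows (rest.drop 2) := by
  rw [pvRows]

-- "".join(x :: xs) is x ++ "".join(xs)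
lemma pvJoinNilCons (x : String) (xs : List String) :
    PySem.Str.join "" (x :: xs) = x ++ PySem.Str.join "" xs := by
  apply String.toList_inj.mp
  cases xs with
  | nil => simp [PySem.Str.toList_join, String.toList_append, PySem.Chars.join, List.intercalate]
  | cons y ys => simp [PySem.Str.toList_join, String.toList_append, PySem.Chars.join_cons_cons]

lemma pvJoinTab3 (a b c : String) :
    PySem.Str.join "\t" [a, b, c] = a ++ "\t" ++ b ++ "\t" ++ c := by
  apply String.toList_inj.mp
  simp [PySem.Str.toList_join, String.toList_append, PySem.Chars.join_cons_cons,
        PySem.Chars.join_singleton]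

lemma pvJoinTab2 (a b : String) :
    PySem.Str.join "\t" [a, b] = a ++ "\t" ++ b := by
  apply String.toList_inj.mp
  simp [PySem.Str.toList_join, String.toList_append, PySem.Chars.join_cons_cons,
        PySem.Chars.join_singleton]

lemma pvJoinNil : PySem.Str.join "" [] = "" := rfl

lemma pvJoinTab1 (a : String) : PySem.Str.join "\t" [a] = a := by
  apply String.toList_inj.mp
  simp [PySem.Str.toList_join, PySem.Chars.join_singleton]

-- A's counter loop, started at any count ≡ 1 (mod 3), builds exactly B's row strings
lemma pvLoop_eq (fs : List String) (acc : String) (c : Int) (hc : c % 3 = 1) :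
    (fs.foldl pvStepA (acc, c)).1 = acc ++ PySem.Str.join "" (pvRows fs) := by
  have hm1 : ¬ (3:Int) ∣ c := by omega
  have hm2 : ¬ (3:Int) ∣ c + 1 := by omega
  have hm3 : (3:Int) ∣ c + 1 + 1 := by omega
  match fs with
  | [] => simp [pvRows, PySem.Str.join, PySem.Chars.join, List.intercalate]
  | [a] =>
      simp only [List.foldl_cons, List.foldl_nil,
        show pvStepA (acc, c) a = (acc ++ a ++ "\t", c + 1) by simp [pvStepA, hm1, String.append_assoc],
        pvRows_cons]
      rw [show List.drop 2 ([] : List String) = [] from rfl,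
          show pvRows ([] : List String) = [] by rw [pvRows]]
      simp [pvJoinNilCons, pvJoinTab1, pvJoinNil, String.append_assoc]
  | [a, b] =>
      simp only [List.foldl_cons, List.foldl_nil,
        show pvStepA (acc, c) a = (acc ++ a ++ "\t", c + 1) by simp [pvStepA, hm1, String.append_assoc],
        show pvStepA (acc ++ a ++ "\t", c + 1) b = (acc ++ a ++ "\t" ++ b ++ "\t", c + 1 + 1) by
          simp [pvStepA, hm2, String.append_assoc],
        pvRows_cons]
      rw [show List.drop 2 [b] = [] from rfl,
          show pvRows ([] : List String) = [] by rw [pvRows]]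
      simp [pvJoinNilCons, pvJoinTab2, pvJoinNil, String.append_assoc]
  | a :: b :: d :: rest =>
      have ih := pvLoop_eq rest (acc ++ a ++ "\t" ++ b ++ "\t" ++ d ++ "\n") (c + 1 + 1 + 1)
        (by omega)
      simp only [List.foldl_cons]
      rw [show pvStepA (acc, c) a = (acc ++ a ++ "\t", c + 1) by simp [pvStepA, hm1, String.append_assoc],
          show pvStepA (acc ++ a ++ "\t", c + 1) b = (acc ++ a ++ "\t" ++ b ++ "\t", c + 1 + 1) by
            simp [pvStepA, hm2, String.append_assoc],
          show pvStepA (acc ++ a ++ "\t" ++ b ++ "\t", c + 1 + 1)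
                 d = (acc ++ a ++ "\t" ++ b ++ "\t" ++ d ++ "\n", c + 1 + 1 + 1) by
            simp [pvStepA, hm3, String.append_assoc],
          ih, show pvRows (a :: b :: d :: rest)
                = (PySem.Str.join "\t" [a, b, d] ++ "\n") :: pvRows rest by
              rw [pvRows_cons]; simp]
      rw [pvJoinNilCons, pvJoinTab3]
      simp [String.append_assoc]
termination_by fs.length

-- ===== VERDICT (by name: the statement is the Claim_ definition above) =====
theorem formatSim_spec : Claim_equal_formatSim := by
  intro msg _
  unfold Spec_formatSim formatSim formatSim_alt
  rw [pvLoop_eq _ "" 1 (by norm_num)]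
  simp
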